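-- pv_equiv track=rewrite | github.com/imcaptor/junqi-dark-layout | junqi-dark-layout/scripts/generate_layout.py | unique_candidates
-- ===== SOURCE A (Python) =====
-- from typing import Dict, List, Tuple
--
-- ROWS = 6
--
-- COLS = 5
--
-- VALID_CELLS = {
--     0,1,2,3,4,
--     5,7,9,
--     10,11,13,14,
--     15,17,19,
--     20,21,22,23,24,
--     25,26,27,28,29,
-- }
--
-- def row_of(idx: int) -> int:
--     return idx // COLS
--
-- def col_of(idx: int) -> int:
--     return idx % COLS
--
-- def valid_row_cells(row_zero_based: int) -> List[int]:
--     return [idx for idx in sorted(VALID_CELLS) if row_of(idx) == row_zero_based]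
--
-- def unique_candidates(rows_pref: List[int], lane: str = "center") -> List[int]:
--     cells = []
--     seen = set()
--     for r in rows_pref:
--         rr = max(0, min(ROWS - 1, r))
--         for idx in valid_row_cells(rr):
--             if idx not in seen:
--                 seen.add(idx)
--                 cells.append(idx)
--     if lane == "left":
--         cells.sort(key=lambda i: (abs(col_of(i)-1), row_of(i), col_of(i)))
--     elif lane == "right":
--         cells.sort(key=lambda i: (abs(col_of(i)-3), row_of(i), col_of(i)))
--     else:
--         cells.sort(key=lambda i: (abs(col_of(i)-2), row_of(i), col_of(i)))
--     return cells
-- ===== SOURCE B (Python) =====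
-- from typing import List
--
-- ROWS = 6
--
-- COLS = 5
--
-- VALID_CELLS = {
--     0,1,2,3,4,
--     5,7,9,
--     10,11,13,14,
--     15,17,19,
--     20,21,22,23,24,
--     25,26,27,28,29,
-- }
--
-- def row_of(idx: int) -> int:
--     return idx // COLS
--
-- def col_of(idx: int) -> int:
--     return idx % COLS
--
-- def unique_candidates(rows_pref: List[int], lane: str = "center") -> List[int]:
--     allowed = {max(0, min(ROWS - 1, r)) for r in rows_pref}
--     cells = [idx for idx in sorted(VALID_CELLS) if row_of(idx) in allowed]
--     if lane == "left":
--         target = 1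
--     elif lane == "right":
--         target = 3
--     else:
--         target = 2
--     cells.sort(key=lambda i: (abs(col_of(i) - target), row_of(i), col_of(i)))
--     return cells
-- ===== Notes on version B (the rewrite author's own statement) =====
-- stated objective: faster
-- what changed: B replaces A's per-preference-row scans of sorted(VALID_CELLS) with seen-set dedup by building the set of clamped rows first and collecting cells in a single filtering pass over sorted(VALID_CELLS), relying on the lane sort key being a total order on distinct cells.
import Mathlib
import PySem

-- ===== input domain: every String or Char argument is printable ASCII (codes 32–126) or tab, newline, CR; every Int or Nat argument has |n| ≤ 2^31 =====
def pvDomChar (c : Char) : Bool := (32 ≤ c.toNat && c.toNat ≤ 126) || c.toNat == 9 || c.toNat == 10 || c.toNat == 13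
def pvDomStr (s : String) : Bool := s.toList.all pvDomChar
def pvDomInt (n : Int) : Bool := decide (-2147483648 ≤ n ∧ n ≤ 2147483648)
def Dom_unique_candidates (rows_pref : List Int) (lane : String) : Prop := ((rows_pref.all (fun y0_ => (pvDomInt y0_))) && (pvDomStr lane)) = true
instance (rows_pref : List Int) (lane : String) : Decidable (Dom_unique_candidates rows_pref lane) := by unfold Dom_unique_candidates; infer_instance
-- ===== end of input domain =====

-- B replaces A's per-row scans with a seen-set dedup by one clamped-row set plus a single
-- filtering pass over sorted(VALID_CELLS); same lane sort key, so the return value is identical.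

-- ===== PORT A =====
-- shared module constants/helpers (both Pythons live in the same module)
def VALID_CELLS : PySem.Set Int :=
  PySem.Set.ofList [0,1,2,3,4,5,7,9,10,11,13,14,15,17,19,20,21,22,23,24,25,26,27,28,29]

def row_of (idx : Int) : Int := PySem.Int.floordiv idx 5   -- COLS = 5

def col_of (idx : Int) : Int := PySem.Int.mod idx 5

def valid_row_cells (row_zero_based : Int) : List Int :=
  (PySem.List.sorted VALID_CELLS (fun x => x) false).filter (fun idx => row_of idx == row_zero_based)

-- Python's stable list.sort with key i ↦ (abs(col_of(i)-t), row_of(i), col_of(i)), modelled as the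
-- same stable insertion sort PySem.List.sorted uses, with the tuple key compared lexicographically.
def laneLt (t a b : Int) : Bool :=
  decide ((col_of a - t).natAbs < (col_of b - t).natAbs ∨
          ((col_of a - t).natAbs = (col_of b - t).natAbs ∧
           (row_of a < row_of b ∨ (row_of a = row_of b ∧ col_of a < col_of b))))

def laneSort (t : Int) (cells : List Int) : List Int :=
  cells.foldl (fun acc x => PySem.List.insertBy (laneLt t) x acc) []

def unique_candidates (rows_pref : List Int) (lane : String) : List Int :=
  let st := rows_pref.foldl
    (fun st r =>
      let rr := max 0 (min (6 - 1) r)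
      (valid_row_cells rr).foldl
        (fun st idx =>
          if PySem.Set.contains st.2 idx then st
          else (st.1 ++ [idx], PySem.Set.add st.2 idx)) st)
    (([] : List Int), (PySem.Set.empty : PySem.Set Int))
  let cells := st.1
  if lane == "left" then laneSort 1 cells
  else if lane == "right" then laneSort 3 cells
  else laneSort 2 cells

-- ===== PORT B =====
def unique_candidates_alt (rows_pref : List Int) (lane : String) : List Int :=
  let allowed : PySem.Set Int := PySem.Set.ofList (rows_pref.map (fun r => max 0 (min (6 - 1) r)))
  let cells := (PySem.List.sorted VALID_CELLS (fun x => x) false).filter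
    (fun idx => PySem.Set.contains allowed (row_of idx))
  let target : Int := if lane == "left" then 1 else if lane == "right" then 3 else 2
  laneSort target cells

-- ===== PRECONDITION & SPEC =====
def Spec_unique_candidates (rows_pref : List Int) (lane : String) (out : List Int) : Prop := out = unique_candidates_alt rows_pref lane
instance (rows_pref : List Int) (lane : String) (out : List Int) : Decidable (Spec_unique_candidates rows_pref lane out) := by unfold Spec_unique_candidates; infer_instance

-- ===== CLAIM (what is proved, stated in full; the proofs are below) =====
def Claim_equal_unique_candidates : Prop := ∀ (rows_pref : List Int) (lane : String), Dom_unique_candidates rows_pref lane → Spec_unique_candidates rows_pref lane (unique_candidates rows_pref lane)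

-- ===== LEMMAS AND PROOFS =====

-- the sorted valid-cell list both ports filter
def sortedValid : List Int := PySem.List.sorted VALID_CELLS (fun x => x) false

-- an injective Int-valued key realising the lane tuple order on the valid cells (proof-side only)
def sortKey (t i : Int) : Int :=
  if 0 ≤ i ∧ i < 30 then ((i % 5 - t).natAbs : Int) * 30 + i
  else if i < 0 then i - 1000 else i + 1000

lemma sortKey_inj (t : Int) (h1 : 1 ≤ t) (h3 : t ≤ 3) : Function.Injective (sortKey t) := by
  intro a b hab
  unfold sortKey at hab
  split_ifs at hab <;> omega

lemma laneLt_eq_key (t : Int) (ht : t = 1 ∨ t = 2 ∨ t = 3) :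
    ∀ a ∈ sortedValid, ∀ b ∈ sortedValid, laneLt t a b = decide (sortKey t a < sortKey t b) := by
  rcases ht with h | h | h <;> subst h <;> decide

lemma insertBy_congr (f g : Int → Int → Bool) (S : List Int)
    (h : ∀ a ∈ S, ∀ b ∈ S, f a b = g a b) (x : Int) (hx : x ∈ S) :
    ∀ (acc : List Int), (∀ y ∈ acc, y ∈ S) →
      PySem.List.insertBy f x acc = PySem.List.insertBy g x acc := by
  intro acc
  induction acc with
  | nil => intro _; rfl
  | cons y ys ih =>
    intro hacc
    have hy : y ∈ S := hacc y (by simp)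
    have hys : ∀ z ∈ ys, z ∈ S := fun z hz => hacc z (by simp [hz])
    simp only [PySem.List.insertBy, h x hx y hy, ih hys]

lemma foldl_insertBy_congr (f g : Int → Int → Bool) (S : List Int)
    (h : ∀ a ∈ S, ∀ b ∈ S, f a b = g a b) :
    ∀ (xs : List Int), (∀ x ∈ xs, x ∈ S) → ∀ (acc : List Int), (∀ y ∈ acc, y ∈ S) →
      xs.foldl (fun acc x => PySem.List.insertBy f x acc) acc
        = xs.foldl (fun acc x => PySem.List.insertBy g x acc) acc := by
  intro xs
  induction xs with
  | nil => intro _ acc _; rfl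
  | cons x xs ih =>
    intro hxs acc hacc
    have hx : x ∈ S := hxs x (by simp)
    have hxs' : ∀ z ∈ xs, z ∈ S := fun z hz => hxs z (by simp [hz])
    have hacc' : ∀ y ∈ PySem.List.insertBy g x acc, y ∈ S := by
      intro y hy
      rcases (PySem.List.mem_insertBy g x y acc).1 hy with rfl | hy'
      · exact hx
      · exact hacc y hy'
    simp only [List.foldl_cons]
    rw [insertBy_congr f g S h x hx acc hacc]
    exact ih hxs' _ hacc'

lemma laneSort_eq_sorted (t : Int) (ht : t = 1 ∨ t = 2 ∨ t = 3)
    (xs : List Int) (hxs : ∀ x ∈ xs, x ∈ sortedValid) :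
    laneSort t xs = PySem.List.sorted xs (sortKey t) false := by
  rw [PySem.List.sorted_eq_foldl_insertBy]
  exact foldl_insertBy_congr _ _ sortedValid (laneLt_eq_key t ht) xs hxs [] (by simp)

lemma laneSort_perm (t : Int) (ht : t = 1 ∨ t = 2 ∨ t = 3)
    (xs ys : List Int) (hxs : ∀ x ∈ xs, x ∈ sortedValid) (hys : ∀ x ∈ ys, x ∈ sortedValid)
    (hp : xs.Perm ys) : laneSort t xs = laneSort t ys := by
  rw [laneSort_eq_sorted t ht xs hxs, laneSort_eq_sorted t ht ys hys]
  exact PySem.List.sorted_eq_sorted_of_perm xs ys (sortKey t)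
    (sortKey_inj t (by omega) (by omega)) hp

-- A's collection loop: cells and seen coincide, and the pair fold is a fold of Set.add
lemma inner_fold_pair (xs : List Int) :
    ∀ (s : PySem.Set Int),
      xs.foldl (fun st idx => if PySem.Set.contains st.2 idx then st
                              else (st.1 ++ [idx], PySem.Set.add st.2 idx))
        ((s : List Int), s)
      = (xs.foldl PySem.Set.add s, xs.foldl PySem.Set.add s) := by
  induction xs with
  | nil => intro s; rfl
  | cons x xs ih =>
    intro s
    simp only [List.foldl_cons]
    by_cases h : PySem.Set.contains s x = true
    · have hadd : PySem.Set.add s x = s := by unfold PySem.Set.add; rw [if_pos h]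
      rw [if_pos h, hadd, ih s]
    · have hadd : PySem.Set.add s x = s ++ [x] := by unfold PySem.Set.add; rw [if_neg h]
      rw [if_neg h, hadd, ← hadd, ih (PySem.Set.add s x)]

def collectRows (rows : List Int) (s : PySem.Set Int) : PySem.Set Int :=
  rows.foldl (fun s r => (valid_row_cells (max 0 (min (6 - 1) r))).foldl PySem.Set.add s) s

lemma outer_fold_pair (rows : List Int) :
    ∀ (l : List Int) (s : PySem.Set Int), l = (s : List Int) →
      rows.foldl (fun st r =>
          (valid_row_cells (max 0 (min (6 - 1) r))).foldl
            (fun st idx => if PySem.Set.contains st.2 idx then st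
                           else (st.1 ++ [idx], PySem.Set.add st.2 idx)) st)
        (l, s)
      = (collectRows rows s, collectRows rows s) := by
  induction rows with
  | nil => intro l s hls; rw [hls]; rfl
  | cons r rows ih =>
    intro l s hls
    subst hls
    simp only [List.foldl_cons, collectRows] at *
    rw [inner_fold_pair, ih _ _ rfl]

lemma mem_foldl_add (xs : List Int) :
    ∀ (s : PySem.Set Int) (y : Int), y ∈ xs.foldl PySem.Set.add s ↔ y ∈ s ∨ y ∈ xs := by
  induction xs with
  | nil => intro s y; simp
  | cons x xs ih =>
    intro s y
    simp only [List.foldl_cons, ih, PySem.Set.mem_add, List.mem_cons]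
    tauto

lemma nodup_foldl_add (xs : List Int) :
    ∀ (s : PySem.Set Int), s.Nodup → (xs.foldl PySem.Set.add s).Nodup := by
  induction xs with
  | nil => intro s hs; exact hs
  | cons x xs ih =>
    intro s hs
    exact ih _ (PySem.Set.nodup_add s x hs)

lemma mem_collectRows (rows : List Int) :
    ∀ (s : PySem.Set Int) (y : Int),
      y ∈ collectRows rows s ↔ y ∈ s ∨ ∃ r ∈ rows, y ∈ valid_row_cells (max 0 (min (6 - 1) r)) := by
  induction rows with
  | nil => intro s y; simp [collectRows]
  | cons r rows ih =>
    intro s y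
    simp only [collectRows, List.foldl_cons] at *
    rw [ih, mem_foldl_add]
    simp only [List.mem_cons]
    constructor
    · rintro (⟨h | h⟩ | ⟨r', hr', h⟩)
      · exact Or.inl h
      · exact Or.inr ⟨r, Or.inl rfl, h⟩
      · exact Or.inr ⟨r', Or.inr hr', h⟩
    · rintro (h | ⟨r', hr' | hr', h⟩)
      · exact Or.inl (Or.inl h)
      · subst hr'; exact Or.inl (Or.inr h)
      · exact Or.inr ⟨r', hr', h⟩

lemma nodup_collectRows (rows : List Int) (s : PySem.Set Int) (hs : s.Nodup) :
    (collectRows rows s).Nodup := by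
  induction rows generalizing s with
  | nil => exact hs
  | cons r rows ih =>
    simp only [collectRows, List.foldl_cons] at *
    exact ih _ (nodup_foldl_add _ s hs)

lemma mem_valid_row_cells (rr y : Int) :
    y ∈ valid_row_cells rr ↔ y ∈ sortedValid ∧ row_of y = rr := by
  simp [valid_row_cells, sortedValid, List.mem_filter]

lemma nodup_sortedValid : sortedValid.Nodup := by decide

-- B's collected cells
lemma mem_cellsB (rows : List Int) (y : Int) :
    y ∈ sortedValid.filter
        (fun idx => PySem.Set.contains (PySem.Set.ofList (rows.map (fun r => max 0 (min (6 - 1) r)))) (row_of idx))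
      ↔ y ∈ sortedValid ∧ ∃ r ∈ rows, max 0 (min (6 - 1) r) = row_of y := by
  simp [List.mem_filter, PySem.Set.contains, PySem.Set.mem_ofList, List.mem_map, eq_comm]

lemma cells_perm (rows : List Int) :
    (collectRows rows PySem.Set.empty).Perm
      (sortedValid.filter
        (fun idx => PySem.Set.contains (PySem.Set.ofList (rows.map (fun r => max 0 (min (6 - 1) r)))) (row_of idx))) := by
  rw [List.perm_ext_iff_of_nodup (nodup_collectRows rows _ (by simp [PySem.Set.empty]))
        (nodup_sortedValid.filter _)]
  intro y
  rw [mem_collectRows, mem_cellsB]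
  simp only [PySem.Set.empty, List.not_mem_nil, false_or]
  constructor
  · rintro ⟨r, hr, h⟩
    rw [mem_valid_row_cells] at h
    exact ⟨h.1, r, hr, h.2.symm⟩
  · rintro ⟨hy, r, hr, h⟩
    exact ⟨r, hr, (mem_valid_row_cells _ y).2 ⟨hy, h.symm⟩⟩

lemma cellsA_sub (rows : List Int) : ∀ x ∈ collectRows rows PySem.Set.empty, x ∈ sortedValid := by
  intro x hx
  rw [mem_collectRows] at hx
  rcases hx with h | ⟨r, _, h⟩
  · simp [PySem.Set.empty] at h
  · exact ((mem_valid_row_cells _ x).1 h).1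

lemma laneSort_cells_eq (rows : List Int) (t : Int) (ht : t = 1 ∨ t = 2 ∨ t = 3) :
    laneSort t (collectRows rows PySem.Set.empty)
      = laneSort t (sortedValid.filter
          (fun idx => PySem.Set.contains (PySem.Set.ofList (rows.map (fun r => max 0 (min (6 - 1) r)))) (row_of idx))) :=
  laneSort_perm t ht _ _ (cellsA_sub rows)
    (fun _ hx => (List.mem_filter.1 hx).1) (cells_perm rows)

-- ===== VERDICT (by name: the statement is the Claim_ definition above) =====
theorem unique_candidates_spec : Claim_equal_unique_candidates := by
  intro rows_pref lane _
  unfold Spec_unique_candidates unique_candidates unique_candidates_alt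
  simp only []
  rw [outer_fold_pair rows_pref [] PySem.Set.empty rfl]
  by_cases h1 : (lane == "left") = true
  · simp only [h1, if_true]
    exact laneSort_cells_eq rows_pref 1 (by tauto)
  · by_cases h2 : (lane == "right") = true
    · simp only [h1, h2, if_true]
      exact laneSort_cells_eq rows_pref 3 (by tauto)
    · simp only [h1, h2]
      exact laneSort_cells_eq rows_pref 2 (by tauto)
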